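-- pv_equiv track=rewrite | github.com/letkh/Informatika23-24 | 13.05.2024/320 variant/8.py | f
-- ===== SOURCE A (Python) =====
-- def f(s):
--     res = []
--     for i in s:
--         if s.count(i) == 2:
--             res.append(i)
--     if len(res) == 2:
--         if f'{res[0]}{res[0]}' in s:
--             return 1
--     return 0
-- ===== SOURCE B (Python) =====
-- def f(s):
--     t = sorted(s)
--     dups = []
--     while t:
--         c = t[0]
--         k = 1
--         while k < len(t) and t[k] == c:
--             k += 1
--         if k == 2:
--             dups.append(c)
--         t = t[k:]
--     return 1 if len(dups) == 1 and dups[0] + dups[0] in s else 0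
-- ===== Notes on version B (the rewrite author's own statement) =====
-- stated objective: faster
-- what changed: B sorts the string and scans it once, measuring each run of equal characters and collecting the characters whose run length is exactly 2, instead of A's per-character s.count scan with per-occurrence appends.
import Mathlib
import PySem

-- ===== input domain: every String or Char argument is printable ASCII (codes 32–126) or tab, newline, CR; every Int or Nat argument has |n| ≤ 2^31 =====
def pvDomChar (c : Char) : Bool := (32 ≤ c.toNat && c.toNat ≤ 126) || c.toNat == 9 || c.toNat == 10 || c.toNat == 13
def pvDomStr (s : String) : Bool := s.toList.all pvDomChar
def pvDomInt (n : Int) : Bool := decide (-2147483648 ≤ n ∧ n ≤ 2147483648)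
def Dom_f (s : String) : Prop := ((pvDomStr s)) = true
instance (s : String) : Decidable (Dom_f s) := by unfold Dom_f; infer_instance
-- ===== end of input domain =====

-- B sorts the string and scans the sorted runs once, collecting characters whose run length is exactly 2; objective: a genuinely different algorithm (sort-then-group vs repeated counting).

-- ===== PORT A =====
def f (s : String) : Int :=
  let res : List Char :=
    s.toList.foldl (fun res i =>
      if PySem.Str.count s (String.ofList [i]) = 2 then res ++ [i] else res) []
  if res.length = 2 then
    if PySem.Str.isIn (String.ofList [res[0]!, res[0]!]) s then 1 else 0
  else 0

-- ===== PORT B =====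
-- the outer while-loop of Source B: measure the run of the head (the inner while = takeWhile),
-- record the head if the run length is exactly 2, continue on the remainder (t = t[k:]).
def runScan : List Char → List Char
  | [] => []
  | c :: t =>
    let run := t.takeWhile (fun x => x == c)
    let rest := t.dropWhile (fun x => x == c)
    (if run.length + 1 = 2 then [c] else []) ++ runScan rest
termination_by l => l.length
decreasing_by
  simp only [List.length_cons]
  exact Nat.lt_succ_of_le (List.length_dropWhile_le _ _)

def f_alt (s : String) : Int :=
  let t := PySem.List.sorted s.toList (fun c => c) false
  let dups := runScan t
  if dups.length = 1 && PySem.Str.isIn (String.ofList [dups[0]!, dups[0]!]) s then 1 else 0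

-- ===== PRECONDITION & SPEC =====
def Spec_f (s : String) (out : Int) : Prop := out = f_alt s
instance (s : String) (out : Int) : Decidable (Spec_f s out) := by unfold Spec_f; infer_instance

-- ===== CLAIM (what is proved, stated in full; the proofs are below) =====
def Claim_equal_f : Prop := ∀ (s : String), Dom_f s → Spec_f s (f s)

-- ===== LEMMAS AND PROOFS =====

-- Python s.count(c) for a single character equals counting that character.
theorem count_go_single (c : Char) (l : List Char) (fuel : Nat) (acc : Nat)
    (h : l.length ≤ fuel) :
    PySem.Chars.count.go [c] fuel l acc = acc + l.count c := by
  induction l generalizing fuel acc with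
  | nil => cases fuel <;> simp [PySem.Chars.count.go]
  | cons x t ih =>
    cases fuel with
    | zero => simp at h
    | succ n =>
      simp only [List.length_cons, Nat.succ_le_succ_iff] at h
      rw [PySem.Chars.count.go]
      by_cases hx : x = c
      · subst hx
        simp [List.isPrefixOf, ih _ _ h]
        omega
      · have hpre : [c].isPrefixOf (x :: t) = false := by
          simp [List.isPrefixOf]
          exact fun hc => hx hc.symm
        simp [hpre, ih _ _ h, hx]

theorem count_single (c : Char) (l : List Char) :
    PySem.Chars.count l [c] = l.count c := by
  rw [PySem.Chars.count]
  simp [count_go_single c l l.length 0 le_rfl]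

-- two distinct elements contribute separate occurrences to the length
theorem two_counts_le {α : Type} [DecidableEq α] (l : List α) (a b : α) (h : a ≠ b) :
    l.count a + l.count b ≤ l.length := by
  induction l with
  | nil => simp
  | cons x t ih =>
    simp only [List.count_cons, List.length_cons]
    by_cases hxa : x = a <;> by_cases hxb : x = b <;> simp_all <;> omega

-- res (A's list) is the filter of the character list by "count = 2".
theorem resA_eq (s : String) :
    s.toList.foldl (fun res i =>
      if PySem.Str.count s (String.ofList [i]) = 2 then res ++ [i] else res) ([] : List Char)
      = s.toList.filter (fun i => s.toList.count i = 2) := by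
  rw [PySem.List.foldl_append_ite_eq_filter]
  simp only [List.nil_append]
  apply List.filter_congr
  intro x _
  simp [String.toList_ofList, count_single]

-- on a ≤-sorted list, runScan returns (without duplicates) exactly the elements whose count is 2
theorem runScan_cons (c : Char) (t : List Char) :
    runScan (c :: t) =
      (if (t.takeWhile (fun x => x == c)).length + 1 = 2 then [c] else [])
        ++ runScan (t.dropWhile (fun x => x == c)) := by
  rw [runScan]

theorem runScan_spec_fuel (n : Nat) : ∀ (l : List Char), l.length ≤ n → l.Pairwise (· ≤ ·) →
    (runScan l).Nodup ∧ ∀ x, x ∈ runScan l ↔ (x ∈ l ∧ l.count x = 2) := by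
  induction n with
  | zero =>
    intro l hlen _
    have : l = [] := List.eq_nil_of_length_eq_zero (Nat.le_zero.1 hlen)
    subst this
    simp [runScan]
  | succ n ihn =>
    intro l hlen h
    rcases l with _ | ⟨c, t⟩
    · simp [runScan]
    · rw [List.pairwise_cons] at h
      obtain ⟨hcle, ht⟩ := h
      set run := t.takeWhile (fun x => x == c) with hrundef
      set rest := t.dropWhile (fun x => x == c) with hrestdef
      have hsplit : t = run ++ rest := (List.takeWhile_append_dropWhile).symm
      have hrun_all : ∀ x ∈ run, x = c := by
        intro x hx
        simpa using List.mem_takeWhile_imp hx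
      have hrest_pw : rest.Pairwise (· ≤ ·) := ht.sublist (List.dropWhile_sublist _)
      have hrest_len : rest.length ≤ n := by
        have h1 : rest.length ≤ t.length := List.length_dropWhile_le _ _
        simp only [List.length_cons] at hlen
        omega
      have hcnotin : c ∉ rest := by
        intro hc
        rcases hd : rest with _ | ⟨d, r⟩
        · rw [hd] at hc; exact absurd hc List.not_mem_nil
        · have hdne : d ≠ c := by
            have hh := List.head?_dropWhile_not (fun x => x == c) t
            rw [← hrestdef, hd] at hh
            simpa using hh
          have hdc : c ≤ d := by
            apply hcle
            have : d ∈ rest := by rw [hd]; simp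
            exact List.Sublist.subset (List.dropWhile_sublist _) this
          rw [hd] at hc
          rcases List.mem_cons.1 hc with hcd | hcr
          · exact hdne hcd.symm
          · rw [hd, List.pairwise_cons] at hrest_pw
            have : d ≤ c := hrest_pw.1 c hcr
            exact hdne (le_antisymm this hdc)
      have hcount_c : (c :: t).count c = run.length + 1 := by
        rw [List.count_cons_self]
        congr 1
        conv_lhs => rw [hsplit]
        rw [List.count_append]
        have h1 : run.count c = run.length := by
          rw [List.count_eq_length]
          intro x hx
          exact ((hrun_all x hx) ▸ rfl : c = x)
        have h2 : rest.count c = 0 := List.count_eq_zero.2 hcnotin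
        omega
      have hcount_ne : ∀ x, x ≠ c → (c :: t).count x = rest.count x := by
        intro x hx
        have hr : run.count x = 0 := by
          rw [List.count_eq_zero]
          intro hmem
          exact hx (hrun_all x hmem)
        have h1 : (c :: t).count x = t.count x := by
          simp [Ne.symm hx]
        rw [h1]
        conv_lhs => rw [hsplit]
        rw [List.count_append, hr]
        omega
      obtain ⟨ihnd, ihmem⟩ := ihn rest hrest_len hrest_pw
      have hcnotscan : c ∉ runScan rest := by
        intro hc
        exact hcnotin ((ihmem c).1 hc).1
      have hmem_rest : ∀ x, x ≠ c → ((x ∈ c :: t) ↔ x ∈ rest) := by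
        intro x hxc
        constructor
        · intro hx
          rcases List.mem_cons.1 hx with h1 | h2
          · exact absurd h1 hxc
          · rw [hsplit] at h2
            rcases List.mem_append.1 h2 with h3 | h4
            · exact absurd (hrun_all x h3) hxc
            · exact h4
        · intro hx
          exact List.mem_cons_of_mem _ (List.Sublist.subset (List.dropWhile_sublist _) hx)
      constructor
      · rw [runScan_cons, ← hrundef, ← hrestdef]
        split_ifs with hlen2
        · simpa using ⟨hcnotscan, ihnd⟩
        · simpa using ihnd
      · intro x
        rw [runScan_cons, ← hrundef, ← hrestdef]
        by_cases hxc : x = c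
        · subst hxc
          split_ifs with hlen2
          · constructor
            · intro _
              exact ⟨by simp, by rw [hcount_c]; omega⟩
            · intro _
              simp
          · simp only [List.nil_append]
            constructor
            · intro hc; exact absurd hc hcnotscan
            · intro hcc
              rw [hcount_c] at hcc
              omega
        · split_ifs with hlen2
          · simp only [List.mem_append, List.mem_singleton, ihmem x,
              hcount_ne x hxc, hmem_rest x hxc, hxc, false_or]
          · simp only [List.nil_append, ihmem x, hcount_ne x hxc, hmem_rest x hxc]

theorem runScan_spec (l : List Char) (h : l.Pairwise (· ≤ ·)) :
    (runScan l).Nodup ∧ ∀ x, x ∈ runScan l ↔ (x ∈ l ∧ l.count x = 2) :=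
  runScan_spec_fuel l.length l le_rfl h

theorem f_spec_aux (s : String) : f s = f_alt s := by
  simp only [f, f_alt]
  rw [resA_eq]
  set l := s.toList with hl
  set t := PySem.List.sorted l (fun c => c) false with htdef
  have hperm : t.Perm l := PySem.List.sorted_perm l _ _
  have hpw : t.Pairwise (· ≤ ·) := by
    have := PySem.List.sorted_pairwise l (fun c => c)
    simpa using this
  obtain ⟨hnd, hmemt⟩ := runScan_spec t hpw
  have hmemq : ∀ x, x ∈ runScan t ↔ (x ∈ l ∧ l.count x = 2) := by
    intro x
    rw [hmemt x, hperm.mem_iff, hperm.count_eq]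
  set p : Char → Bool := fun c => l.count c = 2 with hp
  rcases hq : runScan t with _ | ⟨c, rest⟩
  · -- no character occurs exactly twice: res is empty, dups is empty
    have hres : l.filter p = [] := by
      rw [List.filter_eq_nil_iff]
      intro x hx hpx
      have : x ∈ runScan t := (hmemq x).2 ⟨hx, by simpa [hp] using hpx⟩
      rw [hq] at this
      exact absurd this List.not_mem_nil
    simp [hres]
  · rcases rest with _ | ⟨c2, rest2⟩
    · -- exactly one distinct character c with count 2: res = [c, c], dups = [c]
      have hcq : c ∈ runScan t := by rw [hq]; simp
      obtain ⟨hcl, hcount⟩ := (hmemq c).1 hcq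
      have hpc : p c = true := by simp [hp, hcount]
      have hall : ∀ x ∈ l.filter p, x = c := by
        intro x hx
        rw [List.mem_filter] at hx
        have hcnt : l.count x = 2 := by simpa [hp] using hx.2
        have : x ∈ runScan t := (hmemq x).2 ⟨hx.1, hcnt⟩
        rw [hq] at this
        simpa using this
      have hlen : (l.filter p).length = 2 := by
        have h1 : (l.filter p).length = l.countP p := by
          rw [List.countP_eq_length_filter]
        have h2 : l.countP p = l.count c := by
          rw [List.count]
          apply List.countP_congr
          intro x hx
          constructor
          · intro hpx
            have : x = c := hall x (List.mem_filter.2 ⟨hx, hpx⟩)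
            simp [this]
          · intro hxc
            have : x = c := by simpa using hxc
            rw [this]
            exact hpc
        omega
      have hrep : l.filter p = [c, c] := by
        have := List.eq_replicate_of_mem (l := l.filter p) (a := c) hall
        rw [this, hlen]
        rfl
      simp [hrep]
    · -- at least two distinct characters with count 2: res has length ≥ 4, dups has length ≥ 2
      have hc1 : c ∈ runScan t := by rw [hq]; simp
      have hc2 : c2 ∈ runScan t := by rw [hq]; simp
      obtain ⟨hc1l, hcount1⟩ := (hmemq c).1 hc1
      obtain ⟨hc2l, hcount2⟩ := (hmemq c2).1 hc2
      have hne : c ≠ c2 := by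
        rw [hq, List.nodup_cons] at hnd
        intro h
        exact hnd.1 (h ▸ List.mem_cons_self)
      have hpc1 : p c = true := by simp [hp, hcount1]
      have hpc2 : p c2 = true := by simp [hp, hcount2]
      have hk1 : (l.filter p).count c = l.count c := List.count_filter hpc1
      have hk2 : (l.filter p).count c2 = l.count c2 := List.count_filter hpc2
      have hsum : (l.filter p).count c + (l.filter p).count c2 ≤ (l.filter p).length :=
        two_counts_le _ c c2 hne
      have hne2 : (l.filter p).length ≠ 2 := by omega
      simp [hne2]

-- ===== VERDICT (by name: the statement is the Claim_ definition above) =====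
theorem f_spec : Claim_equal_f := by
  intro s _
  unfold Spec_f
  exact f_spec_aux s
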